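-- pv_equiv track=rewrite | github.com/ShrikaNeeharikaC/Gen-AI-project | rag/prompty.py | extract_fields_from_llm_output
-- ===== SOURCE A (Python) =====
-- def extract_fields_from_llm_output(llm_output):
--     fields = [
--         'EXECUTIVE_SUMMARY',
--         'ROOT_CAUSE',
--         'FIX_STRATEGY',
--         'ROLLBACK_PLAN',
--         'AUTO_FIX_FEASIBILITY',
--         'SEVERITY_LEVEL',
--         'CONFIDENCE_SCORE',
--         'ERROR_COUNT',
--         'WARNING_COUNT',
--         'SUCCESS_INDICATORS',
--         'RESOLUTION_TIME',
--         'BUSINESS_IMPACT',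
--         'TECHNICAL_COMPLEXITY',
--         'MONITORING_RECOMMENDATIONS'
--     ]
--     result = {field: '' for field in fields}
--     lines = [line.strip() for line in llm_output.split('\n') if line.strip()]
--     current_field = None
--     for line in lines:
--         for field in fields:
--             if line.upper().startswith(field):
--                 current_field = field
--                 result[field] = line.split(':', 1)[-1].strip()
--                 break
--         else:
--             if current_field:
--                 result[current_field] += ' ' + line
--     return result
-- ===== SOURCE B (Python) =====
-- FIELDS = [
--     'EXECUTIVE_SUMMARY',
--     'ROOT_CAUSE',
--     'FIX_STRATEGY',
--     'ROLLBACK_PLAN',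
--     'AUTO_FIX_FEASIBILITY',
--     'SEVERITY_LEVEL',
--     'CONFIDENCE_SCORE',
--     'ERROR_COUNT',
--     'WARNING_COUNT',
--     'SUCCESS_INDICATORS',
--     'RESOLUTION_TIME',
--     'BUSINESS_IMPACT',
--     'TECHNICAL_COMPLEXITY',
--     'MONITORING_RECOMMENDATIONS'
-- ]
--
--
-- def _classify(line):
--     u = line.upper()
--     for field in FIELDS:
--         if u.startswith(field):
--             return field
--     return None
--
--
-- def _blocks(lines):
--     # cut the line list into header blocks: (field, header-value joined with its
--     # continuation lines); lines before the first header belong to no block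
--     out = []
--     i, n = 0, len(lines)
--     while i < n:
--         f = _classify(lines[i])
--         if f is None:
--             i += 1
--             continue
--         j = i + 1
--         while j < n and _classify(lines[j]) is None:
--             j += 1
--         head = lines[i].split(':', 1)[-1].strip()
--         out.append((f, ' '.join([head] + lines[i + 1:j])))
--         i = j
--     return out
--
--
-- def extract_fields_from_llm_output(llm_output):
--     lines = [line.strip() for line in llm_output.split('\n') if line.strip()]
--     result = {field: '' for field in FIELDS}
--     for field, value in _blocks(lines):
--         result[field] = value          # a repeated header: the later block wins
--     return result
-- ===== Notes on version B (the rewrite author's own statement) =====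
-- stated objective: alternative
-- what changed: Replaces A's single stateful pass (current_field plus repeated in-place string concatenation into the dict) by a two-phase decomposition: first cut the stripped non-empty lines into header blocks, joining each header remainder with its continuation lines in one space-join, then assign the blocks into a dict initialized with empty values so a repeated header's later block wins.
import Mathlib
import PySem

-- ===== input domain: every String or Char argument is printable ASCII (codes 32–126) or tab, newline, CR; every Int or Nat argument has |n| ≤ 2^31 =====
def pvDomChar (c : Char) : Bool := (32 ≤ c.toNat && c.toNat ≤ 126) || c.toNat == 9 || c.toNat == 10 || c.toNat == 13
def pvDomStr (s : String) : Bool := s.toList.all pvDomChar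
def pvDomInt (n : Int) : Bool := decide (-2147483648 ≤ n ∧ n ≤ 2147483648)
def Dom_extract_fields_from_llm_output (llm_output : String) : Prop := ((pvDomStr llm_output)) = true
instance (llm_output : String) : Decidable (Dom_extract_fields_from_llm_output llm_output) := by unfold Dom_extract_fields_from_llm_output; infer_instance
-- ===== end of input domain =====

-- B re-decomposes A's stateful single pass as: cut the lines into header blocks, then
-- assign each block's joined value (later block wins); same return value, objective: alternative.

-- shared helpers (each is a line of Python both programs contain verbatim)
def pvFields : List String :=
  ["EXECUTIVE_SUMMARY", "ROOT_CAUSE", "FIX_STRATEGY", "ROLLBACK_PLAN",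
   "AUTO_FIX_FEASIBILITY", "SEVERITY_LEVEL", "CONFIDENCE_SCORE", "ERROR_COUNT",
   "WARNING_COUNT", "SUCCESS_INDICATORS", "RESOLUTION_TIME", "BUSINESS_IMPACT",
   "TECHNICAL_COMPLEXITY", "MONITORING_RECOMMENDATIONS"]

-- first field with line.upper().startswith(field), in list order (the for/break scan)
def pvClassify (line : String) : Option String :=
  pvFields.find? (fun f => PySem.Str.startswith (PySem.Str.upper line) f)

-- line.split(':', 1)[-1].strip()   (split(':',1) is never empty, so [-1] never raises)
def pvHeadVal (line : String) : String :=
  PySem.Str.strip ((PySem.List.pyGet? ((PySem.Str.splitMax? line ":" 1).getD [line]) (-1)).getD line)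

-- [line.strip() for line in llm_output.split('\n') if line.strip()]
def pvLines (llm_output : String) : List String :=
  (((PySem.Str.split? llm_output "\n").getD []).filter (fun l => PySem.Str.strip l != "")).map PySem.Str.strip

-- ===== PORT A =====
-- the body of A's for-loop: header line sets current_field and result[field];
-- otherwise, if current_field, append ' ' + line to it
def pvStepA (st : Option String × PySem.Dict String String) (line : String) :
    Option String × PySem.Dict String String :=
  match pvClassify line with
  | some f => (some f, st.2.insert f (pvHeadVal line))
  | none =>
    match st.1 with
    | some cf => (some cf, st.2.insert cf (st.2.getD cf "" ++ " " ++ line))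
    | none => st

def extract_fields_from_llm_output (llm_output : String) : List (String × String) :=
  let result := pvFields.foldl (fun d f => d.insert f "") PySem.Dict.empty
  ((pvLines llm_output).foldl pvStepA (none, result)).2.items

-- ===== PORT B =====
-- cut the line list into header blocks: (field, header value joined with the
-- continuation lines up to the next header); lines before the first header are skipped
def pvBlocks : List String → List (String × String)
  | [] => []
  | l :: ls =>
    match pvClassify l with
    | none => pvBlocks ls
    | some f =>
      (f, PySem.Str.join " " (pvHeadVal l :: ls.takeWhile (fun x => (pvClassify x).isNone)))
        :: pvBlocks (ls.dropWhile (fun x => (pvClassify x).isNone))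
termination_by ls => ls.length
decreasing_by
  · simp
  · exact Nat.lt_succ_of_le (List.length_dropWhile_le _ _)

def extract_fields_from_llm_output_alt (llm_output : String) : List (String × String) :=
  let result := pvFields.foldl (fun d f => d.insert f "") PySem.Dict.empty
  ((pvBlocks (pvLines llm_output)).foldl (fun d p => d.insert p.1 p.2) result).items

-- ===== PRECONDITION & SPEC =====
def Spec_extract_fields_from_llm_output (llm_output : String) (out : List (String × String)) : Prop := out = extract_fields_from_llm_output_alt llm_output
instance (llm_output : String) (out : List (String × String)) : Decidable (Spec_extract_fields_from_llm_output llm_output out) := by unfold Spec_extract_fields_from_llm_output; infer_instance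

-- ===== CLAIM (what is proved, stated in full; the proofs are below) =====
def Claim_equal_extract_fields_from_llm_output : Prop := ∀ (llm_output : String), Dom_extract_fields_from_llm_output llm_output → Spec_extract_fields_from_llm_output llm_output (extract_fields_from_llm_output llm_output)

-- ===== LEMMAS AND PROOFS =====

-- ' '.join swallows its second piece into the first
lemma pv_join_swallow (v c : String) (cs : List String) :
    PySem.Str.join " " (v :: c :: cs) = PySem.Str.join " " ((v ++ " " ++ c) :: cs) := by
  apply String.toList_inj.mp
  cases cs <;> simp [PySem.Str.join, PySem.Chars.join_cons_cons]

-- A's repeated "result[cf] += ' ' + line" over cs, started right after "result[f] = v", is one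
-- insert of the joined value
lemma pv_acc_join (cs : List String) : ∀ (f v : String) (d : PySem.Dict String String),
    cs.foldl (fun d c => d.insert f (d.getD f "" ++ " " ++ c)) (d.insert f v)
      = d.insert f (PySem.Str.join " " (v :: cs)) := by
  induction cs with
  | nil => intro f v d; simp [PySem.Str.join]
  | cons c cs ih =>
      intro f v d
      simp only [List.foldl_cons, PySem.Dict.getD_insert_self, PySem.Dict.insert_insert_self]
      rw [ih f (v ++ " " ++ c) d, pv_join_swallow]

-- running A's loop over continuation (non-header) lines accumulates into the current field
lemma pv_cont (cs : List String) (hcs : ∀ c ∈ cs, pvClassify c = none) :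
    ∀ (f : String) (d : PySem.Dict String String) (rest : List String),
    (cs ++ rest).foldl pvStepA (some f, d)
      = rest.foldl pvStepA (some f, cs.foldl (fun d c => d.insert f (d.getD f "" ++ " " ++ c)) d) := by
  induction cs with
  | nil => intro f d rest; simp
  | cons c cs ih =>
      intro f d rest
      have hc : pvClassify c = none := hcs c (by simp)
      simp only [List.cons_append, List.foldl_cons, pvStepA, hc]
      exact ih (fun x hx => hcs x (by simp [hx])) f _ rest

-- the starting current_field is irrelevant when the next line (if any) is a header
lemma pv_state_irrel (ls : List String)
    (h : ls = [] ∨ ∃ x xs, ls = x :: xs ∧ (pvClassify x).isSome)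
    (c : Option String) (d : PySem.Dict String String) :
    (ls.foldl pvStepA (c, d)).2 = (ls.foldl pvStepA (none, d)).2 := by
  rcases h with h | ⟨x, xs, rfl, hx⟩
  · simp [h]
  · rcases Option.isSome_iff_exists.mp hx with ⟨f, hf⟩
    simp only [List.foldl_cons, pvStepA, hf]

-- MAIN INVARIANT: A's stateful fold over any line list, started with no current field,
-- produces exactly B's "assign each block" fold
lemma pv_loop_eq_blocks : ∀ (n : Nat) (ls : List String), ls.length ≤ n →
    ∀ (d : PySem.Dict String String),
    (ls.foldl pvStepA (none, d)).2
      = (pvBlocks ls).foldl (fun d p => d.insert p.1 p.2) d := by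
  intro n
  induction n with
  | zero =>
      intro ls hls d
      cases ls with
      | nil => simp [pvBlocks]
      | cons l ls' => exact absurd hls (by simp)
  | succ n ih =>
      intro ls hls d
      cases ls with
      | nil => simp [pvBlocks]
      | cons l ls' =>
        rw [pvBlocks.eq_def]
        cases hc : pvClassify l with
        | none =>
            simp only [List.foldl_cons, pvStepA, hc]
            exact ih ls' (by simpa using Nat.lt_succ_iff.mp (by simpa using hls)) d
        | some f =>
            simp only [List.foldl_cons, pvStepA, hc]
            have hsplit := List.takeWhile_append_dropWhile
              (p := fun x => (pvClassify x).isNone) (l := ls')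
            have hcs : ∀ c ∈ ls'.takeWhile (fun x => (pvClassify x).isNone), pvClassify c = none := by
              intro c hcmem
              have := List.mem_takeWhile_imp hcmem
              simpa [Option.isNone_iff_eq_none] using this
            conv_lhs => rw [← hsplit]
            rw [pv_cont _ hcs, pv_acc_join]
            have hrest : ls'.dropWhile (fun x => (pvClassify x).isNone) = []
                ∨ ∃ x xs, ls'.dropWhile (fun x => (pvClassify x).isNone) = x :: xs
                    ∧ (pvClassify x).isSome := by
              cases hdw : ls'.dropWhile (fun x => (pvClassify x).isNone) with
              | nil => exact Or.inl rfl
              | cons x xs =>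
                  refine Or.inr ⟨x, xs, rfl, ?_⟩
                  have hne : ls'.dropWhile (fun x => (pvClassify x).isNone) ≠ [] := by simp [hdw]
                  have := List.head_dropWhile_not (p := fun x => (pvClassify x).isNone) (l := ls') hne
                  simp only [hdw, List.head_cons] at this
                  simpa using this
            rw [pv_state_irrel _ hrest]
            rw [ih _ (le_trans (List.length_dropWhile_le _ _) (Nat.lt_succ_iff.mp (by simpa using hls))) _]

-- ===== VERDICT (by name: the statement is the Claim_ definition above) =====
theorem extract_fields_from_llm_output_spec : Claim_equal_extract_fields_from_llm_output := by
  intro llm_output _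
  unfold Spec_extract_fields_from_llm_output
  unfold extract_fields_from_llm_output extract_fields_from_llm_output_alt
  simp only
  rw [pv_loop_eq_blocks (pvLines llm_output).length (pvLines llm_output) le_rfl]
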